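-- pv_equiv track=rewrite | github.com/HPVoid/Censor-Dispenser | censor_dispenser.py | censor3
-- ===== SOURCE A (Python) =====
-- def censor2(censor_lst, text):
--     censored_text = text
--     censor_lst_cap = []
--     for word in censor_lst:
--         censor_lst_cap.append(word.capitalize())
--     censor_lst_updated = censor_lst + censor_lst_cap
--
--     for word in censor_lst_updated:
--         censor_str = "["
--         for i in range(0, len(word)):
--             censor_str += "-"
--         censor_str += "]"
--         censored_text = censored_text.replace(word, censor_str)
--     return censored_text
--
-- negative_words = ["concerned", "behind", "danger", "dangerous", "alarming", "alarmed", "out of control", "help", "unhappy", "bad", "upset", "awful", "broken", "damage", "damaging", "dismal", "distressed", "distressing", "concerning", "horrible", "horribly", "questionable"]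
--
-- def censor3(censor_lst, negative_lst, text):
--     censored_text = censor2(censor_lst, text)
--     # list including capitalized words
--     negative_lst_cap = []
--     for str in negative_lst:
--         negative_lst_cap.append([str, str.capitalize()])
--
--     # counter for all negative words
--     counter = 0
--     for neg_word in negative_lst_cap:
--         for word in neg_word:
--             counter += censored_text.count(word)
--
--     # find the first negative word + index
--     first_neg_word = []
--     neg_word_index = []
--     for neg_word in negative_lst_cap:
--         for word in neg_word:
--             neg_word_index.append([censored_text.find(word), word])
--     neg_word_index.sort()
--     for word in neg_word_index:
--         if word[0] >= 0:
--             first_neg_word.append(word[0])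
--             first_neg_word.append(word[1])
--             break
--
--     # string until after first negative word
--     str_1 = censored_text[:(first_neg_word[0] + len(first_neg_word[1]))]
--
--     # string from after first negative word
--     str_2 = censored_text[(first_neg_word[0] + len(first_neg_word[1])):]
--
--     censored_str_2 = censor2(negative_words, str_2)
--
--     return str_1 + censored_str_2
-- ===== SOURCE B (Python) =====
-- negative_words = ["concerned", "behind", "danger", "dangerous", "alarming", "alarmed", "out of control", "help", "unhappy", "bad", "upset", "awful", "broken", "damage", "damaging", "dismal", "distressed", "distressing", "concerning", "horrible", "horribly", "questionable"]
--
-- def censor2(censor_lst, text):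
--     for word in censor_lst + [w.capitalize() for w in censor_lst]:
--         text = text.replace(word, "[" + "-" * len(word) + "]")
--     return text
--
-- def censor3(censor_lst, negative_lst, text):
--     censored_text = censor2(censor_lst, text)
--     # single scan: running lexicographic minimum of (index, word) over found negatives
--     best = None
--     for w in negative_lst:
--         for word in (w, w.capitalize()):
--             i = censored_text.find(word)
--             if i >= 0 and (best is None or (i, word) < best):
--                 best = (i, word)
--     if best is None:
--         return censored_text
--     cut = best[0] + len(best[1])
--     return censored_text[:cut] + censor2(negative_words, censored_text[cut:])
-- ===== Notes on version B (the rewrite author's own statement) =====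
-- stated objective: simpler
-- what changed: B drops A's dead word-counting loop and replaces A's build-all-(find,word)-pairs, sort, then scan-for-first-nonnegative with a single pass keeping a running lexicographic minimum (index, word) tuple; ties match the sort's tuple order.
-- outside the precondition, e.g. on censor3([], [], 'abc'): A raises IndexError, B returns 'abc'
-- crash fix: On inputs where no negative word (plain or capitalized) occurs in the censored text, A raises IndexError on first_neg_word[0]; B returns the censored text unchanged. — e.g. on censor3([], [], "abc"): A raises IndexError, B returns "abc"
import Mathlib
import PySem

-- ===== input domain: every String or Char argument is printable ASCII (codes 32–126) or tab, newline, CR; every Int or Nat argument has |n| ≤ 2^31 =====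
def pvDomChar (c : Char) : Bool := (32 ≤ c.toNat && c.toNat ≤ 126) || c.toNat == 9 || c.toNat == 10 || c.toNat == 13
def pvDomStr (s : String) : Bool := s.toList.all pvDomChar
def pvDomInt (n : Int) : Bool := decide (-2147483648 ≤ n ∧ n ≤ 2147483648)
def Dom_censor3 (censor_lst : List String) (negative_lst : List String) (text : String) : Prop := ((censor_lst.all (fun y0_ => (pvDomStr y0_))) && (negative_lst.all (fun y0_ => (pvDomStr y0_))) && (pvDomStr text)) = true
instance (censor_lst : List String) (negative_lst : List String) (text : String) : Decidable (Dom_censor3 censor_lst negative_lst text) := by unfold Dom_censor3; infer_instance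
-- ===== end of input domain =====

-- B replaces A's build-all-(index,word)-pairs-then-sort-then-scan (and A's dead counter loop) by a single
-- running-lexicographic-minimum scan over the negative words; objective: simpler.


-- shared module context: str.capitalize (exact on the ASCII domain: first char uppercased, rest lowered)
def pyCap (s : String) : String :=
  match s.toList with
  | [] => ""
  | c :: rest => String.ofList (PySem.Chars.upper [c] ++ PySem.Chars.lower rest)

-- the module-level constant `negative_words` (used by both Pythons)
def pvNegativeWords : List String := ["concerned", "behind", "danger", "dangerous", "alarming", "alarmed", "out of control", "help", "unhappy", "bad", "upset", "awful", "broken", "damage", "damaging", "dismal", "distressed", "distressing", "concerning", "horrible", "horribly", "questionable"]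

-- ===== PORT A =====
-- A's censor2: caps list built by an append loop; mask "["+"-"*len+"]" built by a range loop
def censor2A (censor_lst : List String) (text : String) : String :=
  let cap := censor_lst.foldl (fun acc w => acc ++ [pyCap w]) []
  (censor_lst ++ cap).foldl
    (fun ct w =>
      let censorStr := String.ofList (((PySem.List.pyRange 0 (PySem.Str.len w) 1).foldl
          (fun cs _ => cs ++ ['-']) ['[']) ++ [']'])
      PySem.Str.replace ct w censorStr) text

-- A's find-first-nonnegative loop with break: returns [] or the singleton it appended to first_neg_word
def firstNegA (l : List (Int × String)) : List (Int × String) :=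
  match l with
  | [] => []
  | p :: rest => if 0 ≤ p.1 then [p] else firstNegA rest

def censor3 (censor_lst : List String) (negative_lst : List String) (text : String) : String :=
  let censoredText := censor2A censor_lst text
  let negCap : List (String × String) := negative_lst.foldl (fun acc s => acc ++ [(s, pyCap s)]) []
  let _counter : Int := negCap.foldl (fun c p => [p.1, p.2].foldl (fun c w => c + (PySem.Str.count censoredText w : Int)) c) 0
  let negWordIndex : List (Int × String) := negCap.foldl
    (fun acc p => [p.1, p.2].foldl (fun acc w => acc ++ [(PySem.Str.find censoredText w, w)]) acc) []
  let sortedIdx := PySem.List.sorted2 negWordIndex Prod.fst Prod.snd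
  let firstNegWord := firstNegA sortedIdx
  -- first_neg_word[0] / [1]: IndexError when no negative word was found — excluded by Pre_censor3
  let fw := PySem.List.pyGetD firstNegWord 0 ((0 : Int), "")
  let cut := fw.1 + PySem.Str.len fw.2
  let str1 := PySem.Str.slice censoredText none (some cut)
  let str2 := PySem.Str.slice censoredText (some cut) none
  str1 ++ censor2A pvNegativeWords str2

-- ===== PORT B =====
-- B's censor2: one pass over censor_lst + capitalized list, mask built directly
def censor2B (censor_lst : List String) (text : String) : String :=
  (censor_lst ++ censor_lst.map pyCap).foldl
    (fun ct w => PySem.Str.replace ct w (String.ofList ('[' :: (List.replicate w.toList.length '-' ++ [']'])))) text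

-- B's running minimum step: Python's `if i >= 0 and (best is None or (i, word) < best)`; tuple `<` is lexicographic
def bestStepB (b : Option (Int × String)) (p : Int × String) : Option (Int × String) :=
  match b with
  | none => if 0 ≤ p.1 then some p else none
  | some q => if 0 ≤ p.1 ∧ (p.1 < q.1 ∨ (p.1 = q.1 ∧ p.2 < q.2)) then some p else some q

def censor3_alt (censor_lst : List String) (negative_lst : List String) (text : String) : String :=
  let ct := censor2B censor_lst text
  let best := negative_lst.foldl
    (fun b w => [w, pyCap w].foldl (fun b word => bestStepB b (PySem.Str.find ct word, word)) b) none
  match best with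
  | none => ct
  | some p =>
    let cut := p.1 + PySem.Str.len p.2
    PySem.Str.slice ct none (some cut) ++ censor2B pvNegativeWords (PySem.Str.slice ct (some cut) none)

-- ===== PRECONDITION & SPEC =====
-- Pre_ excludes exactly the inputs on which no negative word (plain or capitalized) occurs in the
-- censored text: there A's first_neg_word[0] raises IndexError (returns no value).
def Pre_censor3 (censor_lst : List String) (negative_lst : List String) (text : String) : Prop :=
  (negative_lst.any (fun w => PySem.Str.isIn w (censor2A censor_lst text) || PySem.Str.isIn (pyCap w) (censor2A censor_lst text))) = true
instance (censor_lst : List String) (negative_lst : List String) (text : String) : Decidable (Pre_censor3 censor_lst negative_lst text) := by unfold Pre_censor3; infer_instance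

def pvWitness_censor3 : List String × List String × String := (["x"], ["bad"], "too bad")

-- On inputs with no negative word in the censored text A raises IndexError; B returns the censored text unchanged.
def Raises_censor3 (censor_lst : List String) (negative_lst : List String) (text : String) : Prop :=
  (negative_lst.any (fun w => PySem.Str.isIn w (censor2A censor_lst text) || PySem.Str.isIn (pyCap w) (censor2A censor_lst text))) = false
instance (censor_lst : List String) (negative_lst : List String) (text : String) : Decidable (Raises_censor3 censor_lst negative_lst text) := by unfold Raises_censor3; infer_instance
def pvRaiseWitness_censor3 : List String × List String × String := ([], [], "abc")
def pvRaiseWitnessOut_censor3 : String := "abc"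

def Spec_censor3 (censor_lst : List String) (negative_lst : List String) (text : String) (out : String) : Prop := out = censor3_alt censor_lst negative_lst text
instance (censor_lst : List String) (negative_lst : List String) (text : String) (out : String) : Decidable (Spec_censor3 censor_lst negative_lst text out) := by unfold Spec_censor3; infer_instance

-- ===== CLAIM (what is proved, stated in full; the proofs are below) =====
def Claim_equal_censor3 : Prop := ∀ (censor_lst : List String) (negative_lst : List String) (text : String), Dom_censor3 censor_lst negative_lst text → Pre_censor3 censor_lst negative_lst text → Spec_censor3 censor_lst negative_lst text (censor3 censor_lst negative_lst text)
def Claim_raises_censor3 : Prop := (∀ (censor_lst : List String) (negative_lst : List String) (text : String), Dom_censor3 censor_lst negative_lst text → Raises_censor3 censor_lst negative_lst text → ¬ Pre_censor3 censor_lst negative_lst text) ∧ (Dom_censor3 (pvRaiseWitness_censor3.1) (pvRaiseWitness_censor3.2.1) (pvRaiseWitness_censor3.2.2) ∧ Raises_censor3 (pvRaiseWitness_censor3.1) (pvRaiseWitness_censor3.2.1) (pvRaiseWitness_censor3.2.2) ∧ censor3_alt (pvRaiseWitness_censor3.1) (pvRaiseWitness_censor3.2.1) (pvRaiseWitness_censor3.2.2)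 = pvRaiseWitnessOut_censor3)

-- ===== LEMMAS AND PROOFS =====

theorem lex_lt_iff (p q : Int × String) :
    toLex p < toLex q ↔ (p.1 < q.1 ∨ (p.1 = q.1 ∧ p.2 < q.2)) := Prod.Lex.lt_iff ..

theorem dash_foldl (l : List Int) (cs : List Char) :
    l.foldl (fun cs _ => cs ++ ['-']) cs = cs ++ List.replicate l.length '-' := by
  induction l generalizing cs with
  | nil => simp
  | cons x r ih =>
    simp only [List.foldl, ih, List.length_cons]
    rw [List.append_assoc]; simp [List.replicate_succ]

theorem mask_eq (w : String) :
    String.ofList (((PySem.List.pyRange 0 (PySem.Str.len w) 1).foldl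
        (fun cs _ => cs ++ ['-']) ['[']) ++ [']'])
      = String.ofList ('[' :: (List.replicate w.toList.length '-' ++ [']'])) := by
  rw [dash_foldl]; congr 1
  simp [PySem.List.length_pyRange_one, PySem.Str.len_eq]

theorem censor2A_eq_censor2B (lst : List String) (text : String) :
    censor2A lst text = censor2B lst text := by
  unfold censor2A censor2B
  rw [PySem.List.foldl_append_singleton_eq_map, List.nil_append]
  exact List.foldl_ext _ _ text (fun ct w _ => by rw [mask_eq])

def IsMinO (l : List (Int × String)) (o : Option (Int × String)) : Prop :=
  match o with
  | none => ∀ p ∈ l, ¬ 0 ≤ p.1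
  | some m => m ∈ l ∧ 0 ≤ m.1 ∧ ∀ q ∈ l, 0 ≤ q.1 → toLex m ≤ toLex q

theorem isMinO_unique (l : List (Int × String)) (o₁ o₂ : Option (Int × String))
    (h₁ : IsMinO l o₁) (h₂ : IsMinO l o₂) : o₁ = o₂ := by
  match o₁, o₂ with
  | none, none => rfl
  | none, some m => exact absurd h₂.2.1 (h₁ m h₂.1)
  | some m, none => exact absurd h₁.2.1 (h₂ m h₁.1)
  | some m₁, some m₂ =>
    have e : toLex m₁ = toLex m₂ :=
      le_antisymm (h₁.2.2 m₂ h₂.1 h₂.2.1) (h₂.2.2 m₁ h₁.1 h₁.2.1)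
    have : m₁ = m₂ := toLex.injective e
    rw [this]

theorem isMinO_perm (l₁ l₂ : List (Int × String)) (h : l₁.Perm l₂) (o : Option (Int × String))
    (hm : IsMinO l₁ o) : IsMinO l₂ o := by
  match o with
  | none => exact fun p hp => hm p (h.mem_iff.mpr hp)
  | some m =>
    exact ⟨h.mem_iff.mp hm.1, hm.2.1, fun q hq => hm.2.2 q (h.mem_iff.mpr hq)⟩

theorem foldl_bestStepB_aux (l : List (Int × String)) :
    ∀ (b : Option (Int × String)), (∀ q, b = some q → 0 ≤ q.1) →
    match l.foldl bestStepB b with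
    | none => b = none ∧ ∀ p ∈ l, ¬ 0 ≤ p.1
    | some m => 0 ≤ m.1 ∧ (b = some m ∨ m ∈ l) ∧ (∀ q ∈ l, 0 ≤ q.1 → toLex m ≤ toLex q)
        ∧ (∀ q, b = some q → toLex m ≤ toLex q) := by
  induction l with
  | nil =>
    intro b hb
    match b with
    | none => exact ⟨rfl, by simp⟩
    | some q => exact ⟨hb q rfl, Or.inl rfl, by simp, fun q' hq' => by cases hq'; exact le_refl _⟩
  | cons p rest ih =>
    intro b hb
    have hb' : ∀ q, bestStepB b p = some q → 0 ≤ q.1 := by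
      intro q hq
      match b with
      | none =>
        simp only [bestStepB] at hq
        split_ifs at hq with h
        · cases hq; exact h
      | some q₀ =>
        simp only [bestStepB] at hq
        split_ifs at hq with h
        · cases hq; exact h.1
        · cases hq; exact hb _ rfl
    have hstep : (bestStepB b p = b ∧ (0 ≤ p.1 → ∃ q, b = some q ∧ toLex q ≤ toLex p))
        ∨ (bestStepB b p = some p ∧ 0 ≤ p.1 ∧ (∀ q, b = some q → toLex p ≤ toLex q)) := by
      match b with
      | none =>
        by_cases h : 0 ≤ p.1
        · right
          refine ⟨by simp only [bestStepB]; rw [if_pos h], h, fun q hq => by cases hq⟩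
        · left
          exact ⟨by simp only [bestStepB]; rw [if_neg h], fun hc => absurd hc h⟩
      | some q₀ =>
        by_cases h : 0 ≤ p.1 ∧ (p.1 < q₀.1 ∨ (p.1 = q₀.1 ∧ p.2 < q₀.2))
        · right
          refine ⟨by simp only [bestStepB]; rw [if_pos h], h.1, fun q hq => ?_⟩
          cases hq
          exact le_of_lt ((lex_lt_iff p q₀).mpr h.2)
        · left
          refine ⟨by simp only [bestStepB]; rw [if_neg h], fun hp => ⟨q₀, rfl, ?_⟩⟩
          rcases not_and_or.mp h with h' | h'
          · exact absurd hp h'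
          · have hnl : ¬ toLex p < toLex q₀ := fun hc => h' ((lex_lt_iff p q₀).mp hc)
            exact le_of_not_gt hnl
    have IH := ih (bestStepB b p) hb'
    simp only [List.foldl]
    rcases hstep with ⟨he, hrel⟩ | ⟨he, hp, hrel⟩ <;> rw [he] at IH ⊢
    · -- step kept b
      match hfold : List.foldl bestStepB b rest with
      | none =>
        rw [hfold] at IH
        refine ⟨IH.1, fun x hx => ?_⟩
        rcases List.mem_cons.mp hx with rfl | hx'
        · intro hc; rcases hrel hc with ⟨q, hq, -⟩; rw [IH.1] at hq; cases hq
        · exact IH.2 x hx'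
      | some m =>
        rw [hfold] at IH
        refine ⟨IH.1, ?_, fun x hx hx0 => ?_, IH.2.2.2⟩
        · rcases IH.2.1 with h | h
          · exact Or.inl h
          · exact Or.inr (List.mem_cons_of_mem _ h)
        · rcases List.mem_cons.mp hx with rfl | hx'
          · rcases hrel hx0 with ⟨q, hq, hqp⟩
            exact le_trans (IH.2.2.2 q hq) hqp
          · exact IH.2.2.1 x hx' hx0
    · -- step moved to p
      match hfold : List.foldl bestStepB (some p) rest with
      | none =>
        rw [hfold] at IH; cases IH.1
      | some m =>
        rw [hfold] at IH
        refine ⟨IH.1, ?_, fun x hx hx0 => ?_, fun q hq => ?_⟩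
        · rcases IH.2.1 with h | h
          · exact Or.inr (by cases h; exact List.mem_cons_self)
          · exact Or.inr (List.mem_cons_of_mem _ h)
        · rcases List.mem_cons.mp hx with rfl | hx'
          · exact IH.2.2.2 x rfl
          · exact IH.2.2.1 x hx' hx0
        · exact le_trans (IH.2.2.2 p rfl) (hrel q hq)

theorem foldl_bestStepB_isMinO (l : List (Int × String)) : IsMinO l (l.foldl bestStepB none) := by
  have h := foldl_bestStepB_aux l none (by simp)
  unfold IsMinO
  match hfold : List.foldl bestStepB none l with
  | none => rw [hfold] at h; exact h.2
  | some m =>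
    rw [hfold] at h
    refine ⟨?_, h.1, h.2.2.1⟩
    rcases h.2.1 with h' | h'
    · cases h'
    · exact h'

theorem firstNegA_shape (l : List (Int × String)) :
    firstNegA l = ((firstNegA l).head?).toList := by
  induction l with
  | nil => rfl
  | cons p rest ih =>
    unfold firstNegA
    split
    · rfl
    · exact ih

theorem firstNegA_isMinO (l : List (Int × String))
    (h : l.Pairwise (fun a b => toLex a ≤ toLex b)) : IsMinO l ((firstNegA l).head?) := by
  induction l with
  | nil => intro p hp; cases hp
  | cons p rest ih =>
    unfold firstNegA
    by_cases hp : 0 ≤ p.1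
    · simp only [hp, if_true, List.head?]
      exact ⟨List.mem_cons_self, hp, fun q hq _ => by
        rcases List.mem_cons.mp hq with rfl | hq'
        · exact le_refl _
        · exact (List.pairwise_cons.mp h).1 q hq'⟩
    · simp only [hp, if_false]
      have IH := ih (List.pairwise_cons.mp h).2
      unfold IsMinO at IH ⊢
      match ho : (firstNegA rest).head? with
      | none =>
        rw [ho] at IH
        intro x hx
        rcases List.mem_cons.mp hx with rfl | hx'
        · exact hp
        · exact IH x hx'
      | some m =>
        rw [ho] at IH
        refine ⟨List.mem_cons_of_mem _ IH.1, IH.2.1, fun q hq hq0 => ?_⟩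
        rcases List.mem_cons.mp hq with rfl | hq'
        · exact absurd hq0 hp
        · exact IH.2.2 q hq' hq0

theorem sorted2_eq_sorted_toLex (l : List (Int × String)) :
    PySem.List.sorted2 l Prod.fst Prod.snd = PySem.List.sorted l (fun p => toLex p) := by
  unfold PySem.List.sorted2 PySem.List.sorted
  simp only [if_neg (by decide : ¬ (false = true))]
  have hbefore : (fun (a b : Int × String) => decide (a.1 < b.1) || (!decide (b.1 < a.1) && decide (a.2 < b.2)))
      = (fun (a b : Int × String) => decide (toLex a < toLex b)) := by
    funext a b
    by_cases h1 : a.1 < b.1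
    · simp [h1, (lex_lt_iff a b).mpr (Or.inl h1)]
    · by_cases h2 : b.1 < a.1
      · have : ¬ toLex a < toLex b := fun hc => by
          rcases (lex_lt_iff a b).mp hc with h | ⟨he', _⟩ <;> omega
        simp [h1, h2, this]
      · have he : a.1 = b.1 := by omega
        by_cases h3 : a.2 < b.2
        · simp [h1, h2, h3, (lex_lt_iff a b).mpr (Or.inr ⟨he, h3⟩)]
        · have : ¬ toLex a < toLex b := fun hc => by
            rcases (lex_lt_iff a b).mp hc with h | ⟨_, h⟩
            · exact h1 h
            · exact h3 h
          simp [h1, h2, h3, this]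
  rw [hbefore]

theorem sorted2_pairwise_lex (l : List (Int × String)) :
    (PySem.List.sorted2 l Prod.fst Prod.snd).Pairwise (fun a b => toLex a ≤ toLex b) := by
  rw [sorted2_eq_sorted_toLex]
  exact PySem.List.sorted_pairwise l (fun p => toLex p)

-- the list of (find-index, word) candidates both programs inspect
def candsOf (ct : String) (n : List String) : List (Int × String) :=
  (n.flatMap (fun w => [w, pyCap w])).map (fun word => (PySem.Str.find ct word, word))

theorem idx_eq (ct : String) (n : List String) :
    (n.foldl (fun acc s => acc ++ [(s, pyCap s)]) ([] : List (String × String))).foldl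
        (fun acc p => [p.1, p.2].foldl (fun acc w => acc ++ [(PySem.Str.find ct w, w)]) acc) []
      = candsOf ct n := by
  rw [PySem.List.foldl_append_singleton_eq_map, List.nil_append]
  have h1 : ∀ (acc : List (Int × String)) (p : String × String),
      [p.1, p.2].foldl (fun acc w => acc ++ [(PySem.Str.find ct w, w)]) acc
        = acc ++ [(PySem.Str.find ct p.1, p.1), (PySem.Str.find ct p.2, p.2)] := by
    intro acc p; simp [List.foldl]
  rw [List.foldl_ext _ _ [] (fun acc p _ => h1 acc p)]
  rw [PySem.List.foldl_append_eq_flatMap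
    (fun p : String × String => [(PySem.Str.find ct p.1, p.1), (PySem.Str.find ct p.2, p.2)]) _ []]
  simp [candsOf, List.flatMap_map, List.map_flatMap]

theorem best_eq (ct : String) (n : List String) :
    n.foldl (fun b w => [w, pyCap w].foldl
        (fun b word => bestStepB b (PySem.Str.find ct word, word)) b) none
      = (candsOf ct n).foldl bestStepB none := by
  rw [candsOf, List.foldl_map, List.foldl_flatMap]

theorem pre_iff (c n : List String) (t : String) (h : Pre_censor3 c n t) :
    ∃ p ∈ candsOf (censor2A c t) n, 0 ≤ p.1 := by
  unfold Pre_censor3 at h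
  rw [List.any_eq_true] at h
  obtain ⟨w, hw, hor⟩ := h
  rw [Bool.or_eq_true] at hor
  cases hor with
  | inl h1 =>
    refine ⟨(PySem.Str.find (censor2A c t) w, w),
      List.mem_map_of_mem (List.mem_flatMap.mpr ⟨w, hw, by simp⟩), ?_⟩
    rw [PySem.Str.find_nonneg_iff]
    exact (PySem.Str.isIn_iff_infix _ _).mp h1
  | inr h1 =>
    refine ⟨(PySem.Str.find (censor2A c t) (pyCap w), pyCap w),
      List.mem_map_of_mem (List.mem_flatMap.mpr ⟨w, hw, by simp⟩), ?_⟩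
    rw [PySem.Str.find_nonneg_iff]
    exact (PySem.Str.isIn_iff_infix _ _).mp h1

theorem censor3_eq_of_pre (c n : List String) (t : String) (hpre : Pre_censor3 c n t) :
    censor3 c n t = censor3_alt c n t := by
  simp only [censor3, censor3_alt, ← censor2A_eq_censor2B]
  rw [idx_eq (censor2A c t) n, best_eq (censor2A c t) n]
  obtain ⟨p0, hp0, hp00⟩ := pre_iff c n t hpre
  have hmin := foldl_bestStepB_isMinO (candsOf (censor2A c t) n)
  cases hbest : (candsOf (censor2A c t) n).foldl bestStepB none with
  | none => rw [hbest] at hmin; exact absurd hp00 (hmin p0 hp0)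
  | some m =>
    rw [hbest] at hmin
    have hS := firstNegA_isMinO _ (sorted2_pairwise_lex (candsOf (censor2A c t) n))
    have hS' := isMinO_perm _ _
      (PySem.List.sorted2_perm (candsOf (censor2A c t) n) Prod.fst Prod.snd false) _ hS
    have huo := isMinO_unique _ _ _ hS' hmin
    have hshape := firstNegA_shape (PySem.List.sorted2 (candsOf (censor2A c t) n) Prod.fst Prod.snd)
    rw [huo] at hshape
    rw [hshape]
    simp [PySem.List.pyGetD_zero_cons, Option.toList]

-- ===== VERDICT (by name: the statement is the Claim_ definition above) =====
theorem censor3_spec : Claim_equal_censor3 := by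
  intro c n t _ hpre
  unfold Spec_censor3
  exact censor3_eq_of_pre c n t hpre

theorem censor3_raises : Claim_raises_censor3 := by
  unfold Claim_raises_censor3
  refine ⟨?_, by decide⟩
  intro c n t _ hr hp
  unfold Pre_censor3 at hp
  unfold Raises_censor3 at hr
  rw [hr] at hp
  exact Bool.false_ne_true hp

-- self-check that the stated raise witness really lies inside Raises_censor3
theorem censor3_raises_witness_ok :
    Raises_censor3 pvRaiseWitness_censor3.1 pvRaiseWitness_censor3.2.1 pvRaiseWitness_censor3.2.2 :=
  censor3_raises.2.2.1
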